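-- pv_equiv track=rewrite | github.com/weichslgartner/AdventOfCode2022 | Python/day_25.py | part_1
-- ===== SOURCE A (Python) =====
-- from typing import List
--
-- def to_snafu(val) -> str:
--     result = []
--     while val != 0:
--         remainder = val % 5
--         val = val // 5
--         if remainder <= 2:
--             result.append(str(remainder))
--         elif remainder == 3:
--             result.append("=")
--             val += 1
--         elif  remainder == 4:
--             result.append("-")
--             val += 1
--     return ''.join(reversed(result))
--
-- def part_1(lines : List[str]):
--     global_sum = 0
--     for line in lines:
--         for i,c in enumerate(line):
--             val = 0
--             if c.isdigit():
--                 val = int(c)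
--             elif c == "=":
--                 val = -2
--             elif c == '-':
--                 val = -1
--             global_sum += 5**(len(line)-i-1)*val
--     return to_snafu(global_sum)
-- ===== SOURCE B (Python) =====
-- from typing import List
--
-- def _digit_val(c: str) -> int:
--     if c.isdigit():
--         return int(c)
--     if c == "=":
--         return -2
--     if c == "-":
--         return -1
--     return 0
--
-- def _to_snafu(val: int) -> str:
--     # base-5 with offset: shift by 2 so digits -2..2 become 0..4
--     if val == 0:
--         return ""
--     q, r = divmod(val + 2, 5)
--     return _to_snafu(q) + "=-012"[r]
--
-- def part_1(lines: List[str]):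
--     total = 0
--     for line in lines:
--         acc = 0
--         for c in line:            # Horner: no exponentiation
--             acc = acc * 5 + _digit_val(c)
--         total += acc
--     return _to_snafu(total)
-- ===== Notes on version B (the rewrite author's own statement) =====
-- stated objective: faster
-- what changed: Per line, B evaluates the SNAFU value by Horner's rule (acc = acc*5 + digit) instead of computing 5**(len-i-1) for every character, and encodes the sum with a shifted-base-5 recursion divmod(val+2,5) instead of the carrying while-loop.
import Mathlib
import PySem

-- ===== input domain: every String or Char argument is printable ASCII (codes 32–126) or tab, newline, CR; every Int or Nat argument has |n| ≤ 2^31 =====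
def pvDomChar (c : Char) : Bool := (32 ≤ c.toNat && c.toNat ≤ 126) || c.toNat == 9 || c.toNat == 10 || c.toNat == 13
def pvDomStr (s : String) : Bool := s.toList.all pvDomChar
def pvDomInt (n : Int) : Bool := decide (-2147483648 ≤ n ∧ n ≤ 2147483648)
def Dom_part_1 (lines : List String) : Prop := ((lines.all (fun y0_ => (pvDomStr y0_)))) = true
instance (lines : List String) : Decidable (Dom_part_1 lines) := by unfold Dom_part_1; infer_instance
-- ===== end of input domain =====

-- B replaces per-character exponentiation by Horner's rule and the carrying while-loop by a
-- shifted-base-5 recursion (objective: faster, asymptotic in line length).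


-- termination measure used by both snafu recursions
theorem pvSnafuStep_lt (v : Int) (h : v ≠ 0) :
    (PySem.Int.floordiv (v + 2) 5).natAbs < v.natAbs := by
  rw [PySem.Int.floordiv_eq_ediv_of_pos (by norm_num)]
  omega

-- ===== PORT A =====
-- while loop of to_snafu: appends digit strings least-significant first
def toSnafuLoop (val : Int) (result : List String) : List String :=
  if _h : val = 0 then result
  else
    let remainder := PySem.Int.mod val 5
    let val' := PySem.Int.floordiv val 5
    if remainder ≤ 2 then toSnafuLoop val' (result ++ [PySem.Int.toStr remainder])
    else if remainder = 3 then toSnafuLoop (val' + 1) (result ++ ["="])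
    else toSnafuLoop (val' + 1) (result ++ ["-"])
termination_by val.natAbs
decreasing_by
  · have h5 : PySem.Int.floordiv val 5 = PySem.Int.floordiv (val + 2) 5 := by
      rw [PySem.Int.floordiv_eq_ediv_of_pos (by norm_num),
          PySem.Int.floordiv_eq_ediv_of_pos (by norm_num)]
      have : PySem.Int.mod val 5 = val % 5 := PySem.Int.mod_eq_emod_of_pos (by norm_num)
      omega
    rw [h5]; exact pvSnafuStep_lt val _h
  all_goals
    have hm : PySem.Int.mod val 5 = val % 5 := PySem.Int.mod_eq_emod_of_pos (by norm_num)
    have h5 : PySem.Int.floordiv val 5 + 1 = PySem.Int.floordiv (val + 2) 5 := by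
      rw [PySem.Int.floordiv_eq_ediv_of_pos (by norm_num),
          PySem.Int.floordiv_eq_ediv_of_pos (by norm_num)]
      omega
    rw [h5]; exact pvSnafuStep_lt val _h

def to_snafu (val : Int) : String :=
  PySem.Str.join "" (toSnafuLoop val []).reverse

def part_1 (lines : List String) : String :=
  let global_sum : Int := lines.foldl
    (fun gs line =>
      (PySem.List.enumerate line.toList 0).foldl
        (fun gs ic =>
          let i := ic.1
          let c := ic.2
          let val : Int :=
            if PySem.Chars.isdigit c then (PySem.Int.ofChars? [c]).getD 0
            else if c = '=' then -2
            else if c = '-' then -1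
            else 0
          gs + 5 ^ (((line.toList.length : Int) - i - 1)).toNat * val)
        gs)
    0
  to_snafu global_sum

-- ===== PORT B =====
def digitVal (c : Char) : Int :=
  if PySem.Chars.isdigit c then (PySem.Int.ofChars? [c]).getD 0
  else if c = '=' then -2
  else if c = '-' then -1
  else 0

-- _to_snafu of Source B, on the char list of the result
def toSnafuAltChars (val : Int) : List Char :=
  if _h : val = 0 then []
  else
    let q := PySem.Int.floordiv (val + 2) 5
    let r := PySem.Int.mod (val + 2) 5
    toSnafuAltChars q ++ [PySem.List.pyGetD "=-012".toList r '?']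
termination_by val.natAbs
decreasing_by exact pvSnafuStep_lt val _h

def part_1_alt (lines : List String) : String :=
  let total : Int := lines.foldl
    (fun total line =>
      total + line.toList.foldl (fun acc c => acc * 5 + digitVal c) 0)
    0
  String.ofList (toSnafuAltChars total)

-- ===== PRECONDITION & SPEC =====
def Spec_part_1 (lines : List String) (out : String) : Prop := out = part_1_alt lines
instance (lines : List String) (out : String) : Decidable (Spec_part_1 lines out) := by unfold Spec_part_1; infer_instance

-- ===== CLAIM (what is proved, stated in full; the proofs are below) =====
def Claim_equal_part_1 : Prop := ∀ (lines : List String), Dom_part_1 lines → Spec_part_1 lines (part_1 lines)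

-- ===== LEMMAS AND PROOFS =====

theorem horner_shift (cs : List Char) (a : Int) :
    cs.foldl (fun acc c => acc * 5 + digitVal c) a
      = a * 5 ^ cs.length + cs.foldl (fun acc c => acc * 5 + digitVal c) 0 := by
  induction cs generalizing a with
  | nil => simp
  | cons c cs ih =>
    simp only [List.foldl_cons, List.length_cons]
    rw [ih (a * 5 + digitVal c), ih (0 * 5 + digitVal c)]
    ring

theorem line_sum_eq_horner (L : Int) (cs : List Char) (s gs : Int)
    (hs : 0 ≤ s) (hL : s + cs.length = L) :
    (PySem.List.enumerate cs s).foldl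
        (fun gs ic =>
          gs + 5 ^ ((L - ic.1 - 1)).toNat *
            (if PySem.Chars.isdigit ic.2 then (PySem.Int.ofChars? [ic.2]).getD 0
             else if ic.2 = '=' then -2
             else if ic.2 = '-' then -1
             else 0))
        gs
      = gs + cs.foldl (fun acc c => acc * 5 + digitVal c) 0 := by
  induction cs generalizing s gs with
  | nil => simp [PySem.List.enumerate_nil]
  | cons c cs ih =>
    rw [PySem.List.enumerate_cons]
    simp only [List.foldl_cons, List.length_cons] at hL ⊢
    push_cast at hL
    rw [ih (s + 1) _ (by omega) (by omega)]
    have hexp : ((L - s - 1)).toNat = cs.length := by omega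
    rw [hexp, horner_shift cs (0 * 5 + digitVal c)]
    simp only [digitVal]
    ring

theorem toSnafuLoop_eq (v : Int) (acc : List String) :
    toSnafuLoop v acc
      = acc ++ ((toSnafuAltChars v).map (fun c => String.ofList [c])).reverse := by
  induction hn : v.natAbs using Nat.strong_induction_on generalizing v acc with
  | _ n ih =>
  by_cases h : v = 0
  · subst h; rw [toSnafuLoop, toSnafuAltChars]; simp
  · have hm : PySem.Int.mod v 5 = v % 5 := PySem.Int.mod_eq_emod_of_pos (by norm_num)
    have hm2 : PySem.Int.mod (v + 2) 5 = (v + 2) % 5 := PySem.Int.mod_eq_emod_of_pos (by norm_num)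
    have hd : PySem.Int.floordiv v 5 = v / 5 := PySem.Int.floordiv_eq_ediv_of_pos (by norm_num)
    have hd2 : PySem.Int.floordiv (v + 2) 5 = (v + 2) / 5 := PySem.Int.floordiv_eq_ediv_of_pos (by norm_num)
    have hlt : ((v + 2) / 5).natAbs < n := by
      have := pvSnafuStep_lt v h; rw [hd2] at this; omega
    have hstep := fun acc => ih _ hlt ((v + 2) / 5) acc rfl
    rw [toSnafuLoop, toSnafuAltChars]
    simp only [dif_neg h, hm, hm2, hd, hd2]
    have hr0 : 0 ≤ v % 5 := Int.emod_nonneg v (by norm_num)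
    have hr5 : v % 5 < 5 := Int.emod_lt_of_pos v (by norm_num)
    have h03 : v % 5 = 0 ∨ v % 5 = 1 ∨ v % 5 = 2 ∨ v % 5 = 3 ∨ v % 5 = 4 := by omega
    rcases h03 with h0 | h0 | h0 | h0 | h0 <;>
      rw [h0] <;> norm_num <;>
      [ (rw [(by omega : v / 5 = (v + 2) / 5), hstep, (by omega : (v + 2) % 5 = 2)]);
        (rw [(by omega : v / 5 = (v + 2) / 5), hstep, (by omega : (v + 2) % 5 = 3)]);
        (rw [(by omega : v / 5 = (v + 2) / 5), hstep, (by omega : (v + 2) % 5 = 4)]);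
        (rw [(by omega : v / 5 + 1 = (v + 2) / 5), hstep, (by omega : (v + 2) % 5 = 0)]);
        (rw [(by omega : v / 5 + 1 = (v + 2) / 5), hstep, (by omega : (v + 2) % 5 = 1)])] <;>
      simp [PySem.Int.toStr, PySem.Int.toChars, PySem.List.pyGetD, PySem.List.pyGet?, PySem.List.pyIdx?] <;>
      decide

theorem to_snafu_eq (v : Int) : to_snafu v = String.ofList (toSnafuAltChars v) := by
  rw [to_snafu, toSnafuLoop_eq]
  have htl : (PySem.Str.join ""
      ((([] : List String) ++ ((toSnafuAltChars v).map (fun c => String.ofList [c])).reverse).reverse)).toList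
      = toSnafuAltChars v := by
    rw [List.nil_append, List.reverse_reverse, PySem.Str.toList_join]
    have hmap : List.map (String.toList ∘ fun c => String.ofList [c]) (toSnafuAltChars v)
        = (toSnafuAltChars v).map (fun c => [c]) := by simp
    simp only [List.map_map, hmap]
    exact PySem.Chars.join_nil_singletons _
  exact String.ofList_eq.mpr htl.symm ▸ rfl

theorem sums_eq (lines : List String) (gs : Int) :
    lines.foldl
      (fun gs line =>
        (PySem.List.enumerate line.toList 0).foldl
          (fun gs ic =>
            gs + 5 ^ (((line.toList.length : Int) - ic.1 - 1)).toNat *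
              (if PySem.Chars.isdigit ic.2 then (PySem.Int.ofChars? [ic.2]).getD 0
               else if ic.2 = '=' then -2
               else if ic.2 = '-' then -1
               else 0))
          gs)
      gs
    = lines.foldl (fun total line => total + line.toList.foldl (fun acc c => acc * 5 + digitVal c) 0) gs := by
  induction lines generalizing gs with
  | nil => rfl
  | cons l ls ih =>
    simp only [List.foldl_cons]
    rw [line_sum_eq_horner (L := (l.toList.length : Int)) l.toList 0 gs (le_refl 0) (by simp), ih]

-- ===== VERDICT (by name: the statement is the Claim_ definition above) =====
theorem part_1_spec : Claim_equal_part_1 := by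
  intro lines _
  unfold Spec_part_1 part_1 part_1_alt
  rw [sums_eq, to_snafu_eq]
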